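-- pv_equiv track=rewrite | github.com/enzocorsico/adventofcode2022 | day3/part2.py | splitStringOn2
-- ===== SOURCE A (Python) =====
-- def splitStringOn2(string: str):
--     string1 = ""
--     string2 = ""
--
--     for i in range(0, len(string)):
--         if (i < len(string) / 2):
--             string1 += string[i]
--         else:
--             string2 += string[i]
--
--     return [string1, string2]
-- ===== SOURCE B (Python) =====
-- def splitStringOn2(string: str):
--     m = (len(string) + 1) // 2
--     return [string[:m], string[m:]]
-- ===== Notes on version B (the rewrite author's own statement) =====
-- stated objective: simpler
-- what changed: Replaces the per-character loop that branches on i < len/2 and concatenates with computing the split index m=(len+1)//2 once and returning the two slices directly.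
import Mathlib
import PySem

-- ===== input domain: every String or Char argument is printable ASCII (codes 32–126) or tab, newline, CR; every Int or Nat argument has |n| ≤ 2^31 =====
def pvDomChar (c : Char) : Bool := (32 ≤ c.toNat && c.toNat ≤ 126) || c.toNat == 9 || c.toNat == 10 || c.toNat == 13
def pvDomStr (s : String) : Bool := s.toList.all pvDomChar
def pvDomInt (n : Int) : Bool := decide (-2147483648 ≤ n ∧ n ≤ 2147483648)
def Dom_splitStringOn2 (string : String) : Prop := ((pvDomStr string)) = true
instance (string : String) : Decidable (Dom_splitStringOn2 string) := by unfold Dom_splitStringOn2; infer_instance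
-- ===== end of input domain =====

-- B computes the split index m = (len+1)//2 once and returns the two slices, instead of A's
-- per-character loop that branches on i < len/2 and concatenates; objective: simpler.


-- ===== PORT A =====
-- 'i < len(string) / 2' uses float division; for 0 ≤ i < n with n a string length the float
-- comparison is exact and equivalent to the integer comparison 2*i < n, which is how it is ported.
def splitStringOn2 (string : String) : List String :=
  let l := string.toList
  let n : Int := l.length
  let r := (PySem.List.pyRange 0 n 1).foldl
    (fun (acc : List Char × List Char) i =>
      if 2 * i < n then (acc.1 ++ [PySem.List.pyGetD l i ' '], acc.2)
      else (acc.1, acc.2 ++ [PySem.List.pyGetD l i ' ']))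
    ([], [])
  [String.ofList r.1, String.ofList r.2]

-- ===== PORT B =====
def splitStringOn2_alt (string : String) : List String :=
  let l := string.toList
  let m : Int := PySem.Int.floordiv ((l.length : Int) + 1) 2
  [String.ofList (PySem.List.slice l none (some m)), String.ofList (PySem.List.slice l (some m) none)]

-- ===== PRECONDITION & SPEC =====
def Spec_splitStringOn2 (string : String) (out : List String) : Prop := out = splitStringOn2_alt string
instance (string : String) (out : List String) : Decidable (Spec_splitStringOn2 string out) := by unfold Spec_splitStringOn2; infer_instance

-- ===== CLAIM (what is proved, stated in full; the proofs are below) =====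
def Claim_equal_splitStringOn2 : Prop := ∀ (string : String), Dom_splitStringOn2 string → Spec_splitStringOn2 string (splitStringOn2 string)

-- ===== LEMMAS AND PROOFS =====

theorem map_range_getD (l : List Char) (a cnt : Nat) (h : a + cnt ≤ l.length) :
    (List.range cnt).map (fun k => l.getD (a + k) ' ') = (l.drop a).take cnt := by
  apply List.ext_getElem
  · simp; omega
  · intro i h1 h2
    simp only [List.getElem_map, List.getElem_range, List.getElem_take, List.getElem_drop]
    rw [List.getD_eq_getElem _ _ (by simp at h1; omega)]

theorem foldA (l : List Char) (n m : Nat) (h2 : ∀ k, k < m → 2 * k < n) (p q : List Char) :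
    (List.range m).foldl
      (fun (acc : List Char × List Char) (k : Nat) =>
        if 2 * ((0 : Int) + (k : Int)) < (n : Int) then (acc.1 ++ [PySem.List.pyGetD l ((0 : Int) + (k : Int)) ' '], acc.2)
        else (acc.1, acc.2 ++ [PySem.List.pyGetD l ((0 : Int) + (k : Int)) ' ']))
      (p, q)
    = (p ++ (List.range m).map (fun k => l.getD k ' '), q) := by
  induction m with
  | zero => simp
  | succ m ih =>
    rw [List.range_succ, List.foldl_append, List.map_append,
        ih (fun k hk => h2 k (by omega))]
    have hc : 2 * (m : Int) < (n : Int) := by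
      have := h2 m (by omega); omega
    simp [hc, PySem.List.pyGetD_natCast]

theorem foldB (l : List Char) (n m c : Nat) (h2 : ∀ k, k < c → ¬ (2 * (m + k) < n)) (p q : List Char) :
    (List.range c).foldl
      (fun (acc : List Char × List Char) (k : Nat) =>
        if 2 * ((m : Int) + (k : Int)) < (n : Int) then (acc.1 ++ [PySem.List.pyGetD l ((m : Int) + (k : Int)) ' '], acc.2)
        else (acc.1, acc.2 ++ [PySem.List.pyGetD l ((m : Int) + (k : Int)) ' ']))
      (p, q)
    = (p, q ++ (List.range c).map (fun k => l.getD (m + k) ' ')) := by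
  induction c with
  | zero => simp
  | succ c ih =>
    rw [List.range_succ, List.foldl_append, List.map_append,
        ih (fun k hk => h2 k (by omega))]
    have hc : ¬ (2 * ((m : Int) + (c : Int)) < (n : Int)) := by
      have := h2 c (by omega); omega
    have hcast : (m : Int) + (c : Int) = ((m + c : Nat) : Int) := by push_cast; ring
    rw [List.foldl_cons, List.foldl_nil, if_neg hc, hcast, PySem.List.pyGetD_natCast,
        List.append_assoc]
    simp

theorem core_fold (l : List Char) :
    (PySem.List.pyRange 0 (l.length : Int) 1).foldl
      (fun (acc : List Char × List Char) i =>
        if 2 * i < (l.length : Int) then (acc.1 ++ [PySem.List.pyGetD l i ' '], acc.2)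
        else (acc.1, acc.2 ++ [PySem.List.pyGetD l i ' ']))
      ([], [])
    = (l.take ((l.length + 1) / 2), l.drop ((l.length + 1) / 2)) := by
  set n := l.length with hn
  set m := (n + 1) / 2 with hm
  have hmn : m ≤ n := by omega
  rw [PySem.List.pyRange_one_append 0 (m : Int) (n : Int) (by positivity) (by exact_mod_cast hmn),
      List.foldl_append, PySem.List.pyRange_one 0 (m : Int), PySem.List.pyRange_one (m : Int) (n : Int),
      List.foldl_map, List.foldl_map]
  have e1 : ((m : Int) - 0).toNat = m := by omega
  have e2 : ((n : Int) - (m : Int)).toNat = n - m := by omega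
  rw [e1, e2, foldA l n m (by omega), foldB l n m (n - m) (by omega)]
  have h1 : (List.range m).map (fun k => l.getD k ' ') = l.take m := by
    have := map_range_getD l 0 m (by omega)
    simpa using this
  have h2 : (List.range (n - m)).map (fun k => l.getD (m + k) ' ') = l.drop m := by
    rw [map_range_getD l m (n - m) (by omega)]
    exact List.take_of_length_le (by simp; omega)
  rw [h1, h2]
  simp

theorem floordiv_two (n : Nat) : PySem.Int.floordiv ((n : Int) + 1) 2 = (((n + 1) / 2 : Nat) : Int) := by
  simp [PySem.Int.floordiv]
  rw [Int.fdiv_eq_ediv]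
  omega

theorem splitStringOn2_spec : Claim_equal_splitStringOn2 := by
  intro s _
  show splitStringOn2 s = splitStringOn2_alt s
  simp only [splitStringOn2, splitStringOn2_alt]
  rw [core_fold, floordiv_two, PySem.List.slice_to_natCast, PySem.List.slice_from_natCast]

-- ===== VERDICT (by name: the statement is the Claim_ definition above) =====
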